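-- pv_equiv track=rewrite | github.com/stefano-ortona/google-kick-start | python/y2019/roundc/circuit_board.py | compute_max_min_diff
-- ===== SOURCE A (Python) =====
-- def compute_max_min_diff(board):
--     max_min_diff = {}
--     for row in range(len(board)):
--         cur_board = [[0 for j in range(len(board[0]))] for i in range(len(board[0]))]
--         for i in range(len(board[0]) - 1):
--             min_el = board[row][i]
--             max_el = board[row][i]
--             for j in range(i + 1, len(board[0])):
--                 min_el = min(min_el, board[row][j])
--                 max_el = max(max_el, board[row][j])
--                 cur_board[i][j] = max_el - min_el
--         max_min_diff[row] = cur_board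
--     return max_min_diff
-- ===== SOURCE B (Python) =====
-- def compute_max_min_diff(board):
--     if not board:
--         return {}
--     cols = len(board[0])
--     return {
--         r: [[max(row[i:j + 1]) - min(row[i:j + 1]) if i < j else 0
--              for j in range(cols)]
--             for i in range(cols)]
--         for r, row in enumerate(board)
--     }
-- ===== Notes on version B (the rewrite author's own statement) =====
-- stated objective: simpler
-- what changed: Replaces the zero-matrix-then-mutate triple loop maintaining running min/max along each row with a direct nested comprehension that recomputes max/min over the slice row[i:j+1] for each pair, building the dict in one expression.
import Mathlib
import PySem

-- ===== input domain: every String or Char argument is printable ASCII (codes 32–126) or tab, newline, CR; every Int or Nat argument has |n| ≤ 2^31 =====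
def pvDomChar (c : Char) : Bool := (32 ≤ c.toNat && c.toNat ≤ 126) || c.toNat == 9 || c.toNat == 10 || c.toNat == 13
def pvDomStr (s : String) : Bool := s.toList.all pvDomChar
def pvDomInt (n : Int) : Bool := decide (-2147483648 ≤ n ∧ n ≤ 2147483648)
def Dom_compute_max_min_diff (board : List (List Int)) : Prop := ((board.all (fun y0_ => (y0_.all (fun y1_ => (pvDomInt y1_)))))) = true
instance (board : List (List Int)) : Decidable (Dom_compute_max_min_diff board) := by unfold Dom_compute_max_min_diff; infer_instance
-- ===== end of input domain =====

-- B replaces A's mutate-a-zero-matrix triple loop with running min/max by a direct nested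
-- comprehension recomputing max/min over each slice row[i:j+1]; simpler, not faster.

-- ===== PORT A =====
-- cur_board = [[0 for j in range(cols)] for i in range(cols)]
def pvA_zeros (n : Nat) : List (List Int) :=
  (List.range n).map (fun _ => (List.range n).map (fun _ => (0 : Int)))

-- body of 'for j in range(i+1, cols)' on state (min_el, max_el, cur_board)
def pvA_step (r : List Int) (i : Nat) (s : Int × Int × List (List Int)) (j : Nat) :
    Int × Int × List (List Int) :=
  let mn := min s.1 (r.getD j 0)
  let mx := max s.2.1 (r.getD j 0)
  (mn, mx, s.2.2.set i ((s.2.2.getD i []).set j (mx - mn)))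

def compute_max_min_diff (board : List (List Int)) : List (Int × List (List Int)) :=
  (List.range board.length).foldl
    (fun acc row =>
      let cols := (board.headD []).length
      let r := board.getD row []
      let cur :=
        (List.range (cols - 1)).foldl
          (fun cb i =>
            let m := r.getD i 0
            ((List.range' (i + 1) (cols - (i + 1))).foldl (pvA_step r i) (m, m, cb)).2.2)
          (pvA_zeros cols)
      acc ++ [((row : Int), cur)])
    []

-- ===== PORT B =====
-- max(row[i:j+1]) - min(row[i:j+1]) if i < j else 0
def pvB_entry (r : List Int) (i j : Nat) : Int :=
  if i < j then
    ((PySem.List.max? (PySem.List.slice r (some (i : Int)) (some ((j : Int) + 1))) (fun x => x)).getD 0)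
      - ((PySem.List.min? (PySem.List.slice r (some (i : Int)) (some ((j : Int) + 1))) (fun x => x)).getD 0)
  else 0

def compute_max_min_diff_alt (board : List (List Int)) : List (Int × List (List Int)) :=
  match board with
  | [] => []
  | b0 :: _ =>
    let cols := b0.length
    (PySem.List.enumerate board 0).map (fun p =>
      (p.1, (List.range cols).map (fun i => (List.range cols).map (fun j => pvB_entry p.2 i j))))

-- ===== PRECONDITION & SPEC =====
-- Pre_ excludes exactly the boards on which A raises IndexError: board[0] has at least
-- two columns (so the inner loops run) and some row is shorter than board[0].
def Pre_compute_max_min_diff (board : List (List Int)) : Prop :=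
  ∀ r ∈ board, (board.headD []).length ≤ 1 ∨ (board.headD []).length ≤ r.length
instance (board : List (List Int)) : Decidable (Pre_compute_max_min_diff board) := by
  unfold Pre_compute_max_min_diff; infer_instance

def pvWitness_compute_max_min_diff : List (List Int) := [[1, 2], [3, 4]]

def Spec_compute_max_min_diff (board : List (List Int)) (out : List (Int × List (List Int))) : Prop := out = compute_max_min_diff_alt board
instance (board : List (List Int)) (out : List (Int × List (List Int))) : Decidable (Spec_compute_max_min_diff board out) := by unfold Spec_compute_max_min_diff; infer_instance

-- ===== CLAIM (what is proved, stated in full; the proofs are below) =====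
def Claim_equal_compute_max_min_diff : Prop := ∀ (board : List (List Int)), Dom_compute_max_min_diff board → Pre_compute_max_min_diff board → Spec_compute_max_min_diff board (compute_max_min_diff board)

-- ===== LEMMAS AND PROOFS =====

def pvRngMax (r : List Int) (mx : Int) (s n : Nat) : Int :=
  (List.range' s n).foldl (fun a k => max a (r.getD k 0)) mx
def pvRngMin (r : List Int) (mn : Int) (s n : Nat) : Int :=
  (List.range' s n).foldl (fun a k => min a (r.getD k 0)) mn
lemma pvRngMax_succ (r : List Int) (mx : Int) (s n : Nat) :
    pvRngMax r mx s (n + 1) = max (pvRngMax r mx s n) (r.getD (s + n) 0) := by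
  simp [pvRngMax, List.range'_concat]
lemma pvRngMin_succ (r : List Int) (mn : Int) (s n : Nat) :
    pvRngMin r mn s (n + 1) = min (pvRngMin r mn s n) (r.getD (s + n) 0) := by
  simp [pvRngMin, List.range'_concat]
def pvFill (r : List Int) (mn mx : Int) (s n : Nat) (rw : List Int) : List Int :=
  (List.range' s n).foldl
    (fun rw' j => rw'.set j (pvRngMax r mx s (j + 1 - s) - pvRngMin r mn s (j + 1 - s))) rw
lemma set_getD_self {α : Type} (l : List α) (i : Nat) (d : α) (hi : i < l.length) :
    l.set i (l.getD i d) = l := by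
  apply List.ext_getElem <;> simp [List.getD, hi]
lemma pvA_inner_closed (r : List Int) (i : Nat) :
    ∀ (n s : Nat) (mn mx : Int) (cb : List (List Int)), i < cb.length →
      (List.range' s n).foldl (pvA_step r i) (mn, mx, cb) =
        (pvRngMin r mn s n, pvRngMax r mx s n, cb.set i (pvFill r mn mx s n (cb.getD i []))) := by
  intro n
  induction n with
  | zero =>
    intro s mn mx cb hi
    simp only [List.range'_zero, List.foldl_nil, pvRngMin, pvRngMax, pvFill]
    rw [set_getD_self cb i [] hi]
  | succ n ih =>
    intro s mn mx cb hi
    rw [List.range'_concat, List.foldl_append, ih s mn mx cb hi]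
    simp only [List.foldl_cons, List.foldl_nil, pvA_step, pvRngMin_succ, pvRngMax_succ,
      Prod.mk.injEq, one_mul]
    refine ⟨trivial, trivial, ?_⟩
    rw [List.set_set]
    congr 1
    have h1 : (cb.set i (pvFill r mn mx s n (cb.getD i []))).getD i [] = pvFill r mn mx s n (cb.getD i []) := by
      simp [List.getD, hi]
    rw [h1]
    conv_rhs => rw [pvFill, List.range'_concat]
    rw [List.foldl_append]
    simp only [List.foldl_cons, List.foldl_nil, one_mul]
    have h2 : s + n + 1 - s = n + 1 := by omega
    rw [h2, pvRngMax_succ, pvRngMin_succ, pvFill]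

lemma foldl_set_length (v : Nat → Int) : ∀ (l : List Nat) (rw : List Int),
    (l.foldl (fun rw' j => rw'.set j (v j)) rw).length = rw.length := by
  intro l
  induction l with
  | nil => intro rw; rfl
  | cons j t ih => intro rw; simp [ih]

lemma foldl_set_getD (v : Nat → Int) : ∀ (l : List Nat) (rw : List Int) (q : Nat),
    (l.foldl (fun rw' j => rw'.set j (v j)) rw).getD q 0 =
      if q ∈ l ∧ q < rw.length then v q else rw.getD q 0 := by
  intro l
  induction l with
  | nil => intro rw q; simp
  | cons j t ih =>
    intro rw q
    simp only [List.foldl_cons]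
    rw [ih]
    by_cases ht : q ∈ t
    · simp only [ht, List.mem_cons, or_true, true_and, List.getD, List.length_set]
      split_ifs with hlen
      · rfl
      · rw [List.getElem?_eq_none (by simpa using (by omega : rw.length ≤ q)),
          List.getElem?_eq_none (by omega)]
    · by_cases hq : q = j
      · subst hq
        by_cases hlen : q < rw.length
        · simp [ht, hlen, List.getD]
        · simp [ht, hlen]
      · simp [ht, hq, List.getD, List.getElem?_set_ne (by omega : j ≠ q)]

lemma pvFill_length (r : List Int) (mn mx : Int) (s n : Nat) (rw : List Int) :
    (pvFill r mn mx s n rw).length = rw.length := foldl_set_length _ _ _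

lemma pvFill_getD (r : List Int) (mn mx : Int) (s n : Nat) (rw : List Int) (q : Nat) :
    (pvFill r mn mx s n rw).getD q 0 =
      if s ≤ q ∧ q < s + n ∧ q < rw.length
      then pvRngMax r mx s (q + 1 - s) - pvRngMin r mn s (q + 1 - s)
      else rw.getD q 0 := by
  rw [pvFill, foldl_set_getD]
  by_cases h : q ∈ List.range' s n
  · have := List.mem_range'_1.mp h
    by_cases hl : q < rw.length <;> simp_all
  · have h1 : ¬(q ∈ List.range' s n ∧ q < rw.length) := fun hx => h hx.1
    have h2 : ¬(s ≤ q ∧ q < s + n ∧ q < rw.length) :=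
      fun hx => h (List.mem_range'_1.mpr ⟨hx.1, hx.2.1⟩)
    rw [if_neg h1, if_neg h2]


def pvTgt (r : List Int) (cols : Nat) (m : Nat) : List (List Int) :=
  (List.range cols).map (fun p =>
    (List.range cols).map (fun q =>
      if p < m ∧ p < q then
        pvRngMax r (r.getD p 0) (p + 1) (q - p) - pvRngMin r (r.getD p 0) (p + 1) (q - p)
      else 0))

lemma getD_map_range {α : Type} (f : Nat → α) (n q : Nat) (d : α) :
    ((List.range n).map f).getD q d = if q < n then f q else d := by
  by_cases h : q < n
  · simp [List.getD, h]
  · simp only [List.getD, if_neg h]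
    rw [List.getElem?_eq_none (by simpa using (by omega : n ≤ q))]
    rfl

lemma pvA_outer_closed (r : List Int) (cols : Nat) :
    ∀ m, m ≤ cols - 1 →
      (List.range m).foldl
        (fun cb i =>
          ((List.range' (i + 1) (cols - (i + 1))).foldl (pvA_step r i)
            (r.getD i 0, r.getD i 0, cb)).2.2)
        (pvA_zeros cols) = pvTgt r cols m := by
  intro m
  induction m with
  | zero => intro _; simp [pvA_zeros, pvTgt]
  | succ m ih =>
    intro hm
    have hcols : m + 1 < cols := by omega
    have hlen : m < (pvTgt r cols m).length := by simp [pvTgt]; omega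
    rw [List.range_succ, List.foldl_append, ih (by omega)]
    simp only [List.foldl_cons, List.foldl_nil]
    rw [pvA_inner_closed r m _ _ _ _ _ hlen]
    have hrow : (pvTgt r cols m).getD m [] = (List.range cols).map (fun _ => (0 : Int)) := by
      rw [pvTgt, getD_map_range]
      simp [Nat.lt_of_succ_lt hcols]
    rw [hrow]
    apply List.ext_getElem
    · simp [pvTgt]
    intro p hp hp2
    rw [List.getElem_set]
    by_cases hpm : m = p
    · subst hpm
      rw [if_pos rfl]
      apply List.ext_getElem
      · simp [pvFill_length, pvTgt]
      intro q hq1 hq2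
      have hqc : q < cols := by simpa [pvFill_length] using hq1
      rw [(List.getD_eq_getElem (pvFill _ _ _ _ _ _) 0 hq1).symm, pvFill_getD]
      simp only [pvTgt, List.getElem_map, List.getElem_range]
      simp only [List.length_map, List.length_range]
      by_cases hpq : m < q
      · rw [if_pos ⟨by omega, by omega, hqc⟩, if_pos ⟨by omega, hpq⟩]
        have h3 : q + 1 - (m + 1) = q - m := by omega
        rw [h3]
      · rw [if_neg (by omega), if_neg (by rintro ⟨-, b⟩; exact hpq b), getD_map_range, if_pos hqc]
    · rw [if_neg hpm]
      simp only [pvTgt, List.getElem_map, List.getElem_range]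
      apply List.map_congr_left
      intro q _
      by_cases h1 : p < m ∧ p < q
      · rw [if_pos h1, if_pos ⟨by omega, h1.2⟩]
      · rw [if_neg h1, if_neg (by rintro ⟨a, b⟩; exact h1 ⟨by omega, b⟩)]


lemma seg_map (r : List Int) : ∀ (n s : Nat), s + n ≤ r.length →
    (r.drop s).take n = (List.range' s n).map (fun k => r.getD k 0) := by
  intro n
  induction n with
  | zero => intro s _; simp
  | succ n ih =>
    intro s hs
    have hsl : s < r.length := by omega
    rw [List.range'_succ, List.map_cons, List.drop_eq_getElem_cons hsl, List.take_succ_cons,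
      ih (s + 1) (by omega), List.getD_eq_getElem r 0 hsl]

lemma pvB_entry_eq (r : List Int) (cols : Nat) (hc : cols ≤ 1 ∨ cols ≤ r.length) (i j : Nat)
    (hj : j < cols) : pvB_entry r i j =
      if i < j then pvRngMax r (r.getD i 0) (i + 1) (j - i) - pvRngMin r (r.getD i 0) (i + 1) (j - i)
      else 0 := by
  unfold pvB_entry
  by_cases hij : i < j
  · have hc' : cols ≤ r.length := by rcases hc with h | h <;> omega
    rw [if_pos hij, if_pos hij]
    have hcast : ((j : Int) + 1) = (((j + 1 : Nat) : Int)) := by push_cast; ring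
    rw [hcast, PySem.List.slice_natCast]
    have hi : i < r.length := by omega

    have hstep : j + 1 - i = (j - i) + 1 := by omega
    rw [hstep, List.drop_eq_getElem_cons hi, List.take_succ_cons,
      seg_map r (j - i) (i + 1) (by omega),
      PySem.List.max?_id_cons, PySem.List.min?_id_cons]
    simp only [Option.getD_some]
    rw [List.foldl_map, List.foldl_map, List.getD_eq_getElem r 0 hi]
    rfl
  · rw [if_neg hij, if_neg hij]

lemma foldl_append_map {β : Type} (g : Nat → β) : ∀ (n : Nat) (acc : List β),
    (List.range n).foldl (fun a k => a ++ [g k]) acc = acc ++ (List.range n).map g := by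
  intro n
  induction n with
  | zero => intro acc; simp
  | succ n ih => intro acc; rw [List.range_succ, List.foldl_append, List.map_append, ih]; simp


lemma pv_main (board : List (List Int)) (hpre : Pre_compute_max_min_diff board) :
    compute_max_min_diff board = compute_max_min_diff_alt board := by
  cases board with
  | nil => rfl
  | cons b0 bs =>
    simp only [compute_max_min_diff, compute_max_min_diff_alt, List.headD_cons]
    rw [foldl_append_map, List.nil_append,
      PySem.List.enumerate_eq_map_pyRange (b0 :: bs) ([] : List Int), PySem.List.pyRange_one]
    simp only [List.map_map, PySem.List.len, Int.sub_zero, Int.toNat_natCast]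
    apply List.map_congr_left
    intro k hk
    have hklt : k < (b0 :: bs).length := List.mem_range.mp hk
    simp only [Function.comp, zero_add, PySem.List.pyGetD_natCast]
    refine Prod.ext rfl ?_
    have hrmem : (b0 :: bs).getD k [] ∈ b0 :: bs := by
      rw [List.getD_eq_getElem _ _ hklt]; exact List.getElem_mem hklt
    have hc : b0.length ≤ 1 ∨ b0.length ≤ ((b0 :: bs).getD k []).length := hpre _ hrmem
    rw [pvA_outer_closed _ b0.length (b0.length - 1) (le_refl _)]
    simp only [pvTgt]
    apply List.map_congr_left
    intro p hp
    apply List.map_congr_left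
    intro q hq
    rw [pvB_entry_eq _ b0.length hc p q (List.mem_range.mp hq)]
    by_cases hpq : p < q
    · rw [if_pos ⟨by have := List.mem_range.mp hq; omega, hpq⟩, if_pos hpq]
    · rw [if_neg (by rintro ⟨-, b⟩; exact hpq b), if_neg hpq]

-- ===== VERDICT (by name: the statement is the Claim_ definition above) =====
theorem compute_max_min_diff_spec : Claim_equal_compute_max_min_diff := by
  intro board _ hpre
  exact pv_main board hpre
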